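-- pv_equiv track=rewrite | github.com/Daniel-creator-dot/primehospital | hospital/views_billing_claims.py | _format_payment_channel_labels
-- ===== SOURCE A (Python) =====
-- _PAYMENT_CHANNEL_SHORT = {
--     'cash': 'Cash',
--     'mobile_money': 'MoMo',
--     'card': 'Card',
--     'bank_transfer': 'Bank transfer',
--     'cheque': 'Cheque',
--     'insurance': 'Insurance',
--     'deposit': 'Deposit',
-- }
--
-- _PAYMENT_CHANNEL_ORDER = (
--     'cash', 'mobile_money', 'card', 'bank_transfer', 'cheque', 'deposit', 'insurance',
-- )
--
-- def _format_payment_channel_labels(methods):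
--     """Turn distinct payment_method codes into a stable display string."""
--     if not methods:
--         return ''
--     s = set(methods)
--     parts = []
--     for m in _PAYMENT_CHANNEL_ORDER:
--         if m in s:
--             parts.append(_PAYMENT_CHANNEL_SHORT.get(m, m.replace('_', ' ').title()))
--     for m in sorted(s):
--         if m not in _PAYMENT_CHANNEL_ORDER:
--             parts.append(_PAYMENT_CHANNEL_SHORT.get(m, str(m)))
--     return ', '.join(parts)
-- ===== SOURCE B (Python) =====
-- _PAYMENT_CHANNEL_SHORT = {
--     'cash': 'Cash',
--     'mobile_money': 'MoMo',
--     'card': 'Card',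
--     'bank_transfer': 'Bank transfer',
--     'cheque': 'Cheque',
--     'insurance': 'Insurance',
--     'deposit': 'Deposit',
-- }
--
-- _PAYMENT_CHANNEL_ORDER = (
--     'cash', 'mobile_money', 'card', 'bank_transfer', 'cheque', 'deposit', 'insurance',
-- )
--
--
-- def _format_payment_channel_labels(methods):
--     """Turn distinct payment_method codes into a stable display string."""
--     rank = {c: i for i, c in enumerate(_PAYMENT_CHANNEL_ORDER)}
--     ordered = sorted(set(methods),
--                      key=lambda m: (rank.get(m, len(_PAYMENT_CHANNEL_ORDER)), m))
--     return ', '.join(_PAYMENT_CHANNEL_SHORT.get(m, m) for m in ordered)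
-- ===== Notes on version B (the rewrite author's own statement) =====
-- stated objective: simpler
-- what changed: Replaces A's two differently-shaped passes (a scan over the fixed channel-order tuple plus a second pass over the sorted leftovers) with a single sort of the distinct codes under a composite (rank, name) key followed by one label-mapping join.
import Mathlib
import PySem

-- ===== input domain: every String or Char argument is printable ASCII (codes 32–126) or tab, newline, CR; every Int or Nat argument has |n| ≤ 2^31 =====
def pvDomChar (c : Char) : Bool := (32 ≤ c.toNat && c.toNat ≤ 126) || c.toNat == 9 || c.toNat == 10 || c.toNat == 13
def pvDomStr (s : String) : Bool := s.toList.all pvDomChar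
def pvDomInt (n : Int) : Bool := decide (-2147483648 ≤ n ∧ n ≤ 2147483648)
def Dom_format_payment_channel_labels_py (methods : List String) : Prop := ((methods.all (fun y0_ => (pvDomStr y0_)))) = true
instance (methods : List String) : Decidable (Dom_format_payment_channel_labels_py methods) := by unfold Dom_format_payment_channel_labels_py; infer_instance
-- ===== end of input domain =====

-- B replaces A's two differently-shaped passes (fixed-order scan + sorted-leftover scan) by one
-- keyed sort of the distinct codes with a composite (rank, name) key; objective: simpler.

-- ===== PORT A =====
def payShort : PySem.Dict String String :=
  PySem.Dict.ofList [("cash", "Cash"), ("mobile_money", "MoMo"), ("card", "Card"), ("bank_transfer", "Bank transfer"),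
   ("cheque", "Cheque"), ("insurance", "Insurance"), ("deposit", "Deposit")]

def payOrder : List String :=
  ["cash", "mobile_money", "card", "bank_transfer", "cheque", "deposit", "insurance"]

-- hand port of str.title() (exact on ASCII: a letter is upper-cased after a non-letter, lower-cased otherwise)
def pyTitleGo (prevAlpha : Bool) : List Char → List Char
  | [] => []
  | c :: t => (if c.isAlpha then (if prevAlpha then c.toLower else c.toUpper) else c) :: pyTitleGo c.isAlpha t

def format_payment_channel_labels_py (methods : List String) : String :=
  if methods = [] then "" else
    let s := PySem.Set.ofList methods
    let parts1 := payOrder.foldl (fun parts m =>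
      if PySem.Set.contains s m then
        parts ++ [payShort.getD m (String.ofList (pyTitleGo false (PySem.Str.replace m "_" " ").toList))]
      else parts) []
    let parts2 := (PySem.List.sorted s (fun x => x)).foldl (fun parts m =>
      if !payOrder.contains m then parts ++ [payShort.getD m m] else parts) parts1
    PySem.Str.join ", " parts2

-- ===== PORT B =====
def format_payment_channel_labels_py_alt (methods : List String) : String :=
  let rank : PySem.Dict String Int := (PySem.List.enumerate payOrder).foldl (fun d p => d.insert p.2 p.1) PySem.Dict.empty
  let ordered := PySem.List.sorted (PySem.Set.ofList methods)
    (fun m => toLex (rank.getD m (payOrder.length : Int), m))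
  PySem.Str.join ", " (ordered.map (fun m => payShort.getD m m))

-- ===== PRECONDITION & SPEC =====
def Spec_format_payment_channel_labels_py (methods : List String) (out : String) : Prop := out = format_payment_channel_labels_py_alt methods
instance (methods : List String) (out : String) : Decidable (Spec_format_payment_channel_labels_py methods out) := by unfold Spec_format_payment_channel_labels_py; infer_instance

-- ===== CLAIM (what is proved, stated in full; the proofs are below) =====
def Claim_equal_format_payment_channel_labels_py : Prop := ∀ (methods : List String), Dom_format_payment_channel_labels_py methods → Spec_format_payment_channel_labels_py methods (format_payment_channel_labels_py methods)

-- ===== LEMMAS AND PROOFS =====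

def pvRank : PySem.Dict String Int :=
  (PySem.List.enumerate payOrder).foldl (fun d p => d.insert p.2 p.1) PySem.Dict.empty

def pvKey (m : String) : Lex (Int × String) := toLex (pvRank.getD m (payOrder.length : Int), m)

lemma pvRank_eq : pvRank = PySem.Dict.mk
    [("cash", 0), ("mobile_money", 1), ("card", 2), ("bank_transfer", 3),
     ("cheque", 4), ("deposit", 5), ("insurance", 6)] := by decide

lemma pvKey_of_not_mem (m : String) (hm : m ∉ payOrder) : pvKey m = toLex (7, m) := by
  simp [payOrder, List.mem_cons] at hm
  obtain ⟨h1, h2, h3, h4, h5, h6, h7⟩ := hm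
  simp [pvKey, pvRank_eq, payOrder, PySem.Dict.getD_eq_get?_getD, PySem.Dict.get?,
    Ne.symm h1, Ne.symm h2, Ne.symm h3, Ne.symm h4, Ne.symm h5, Ne.symm h6, Ne.symm h7]

lemma payOrder_pairwise_key : List.Pairwise (fun a b => pvKey a < pvKey b) payOrder := by
  rw [show (fun a b => pvKey a < pvKey b) = fun a b => decide (pvKey a < pvKey b) = true by
    funext a b; simp]
  decide

lemma key_lt_of_mem_not_mem (a b : String) (ha : a ∈ payOrder) (hb : b ∉ payOrder) :
    pvKey a < pvKey b := by
  rw [pvKey_of_not_mem b hb]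
  fin_cases ha <;> exact Prod.Lex.left _ _ (by decide)

lemma known_label (m : String) (hm : m ∈ payOrder) :
    payShort.getD m (String.ofList (pyTitleGo false (PySem.Str.replace m "_" " ").toList)) =
      payShort.getD m m := by
  fin_cases hm <;> rfl

theorem main_eq (methods : List String) :
    format_payment_channel_labels_py methods = format_payment_channel_labels_py_alt methods := by
  by_cases hnil : methods = []
  · subst hnil; decide
  · unfold format_payment_channel_labels_py format_payment_channel_labels_py_alt
    rw [if_neg hnil]
    set s := PySem.Set.ofList methods with hs
    have hrank : ((PySem.List.enumerate payOrder).foldl (fun d p => d.insert p.2 p.1)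
        PySem.Dict.empty) = pvRank := rfl
    simp only [hrank]
    have hkey : (fun m => toLex (pvRank.getD m (payOrder.length : Int), m)) = pvKey := rfl
    simp only [hkey]
    have hsnodup : s.Nodup := PySem.Set.nodup_ofList methods
    -- the two pieces of A's parts list
    set known := payOrder.filter (fun m => PySem.Set.contains s m) with hknown
    set u := (PySem.List.sorted s (fun x => x)).filter (fun m => !payOrder.contains m) with hu
    -- B's sorted list is exactly known ++ u
    have hmemknown : ∀ m ∈ known, m ∈ payOrder := fun m hm => (List.mem_filter.mp hm).1
    have hmemu : ∀ m ∈ u, m ∉ payOrder := by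
      intro m hm
      have := (List.mem_filter.mp hm).2
      simpa using this
    have hperm : (known ++ u).Perm s := by
      have h1 : known.Perm (s.filter (fun m => payOrder.contains m)) := by
        rw [List.perm_ext_iff_of_nodup (by exact List.Nodup.filter _ (by decide))
          (List.Nodup.filter _ hsnodup)]
        intro a
        simp only [hknown, List.mem_filter, PySem.Set.contains_iff, List.contains_iff_mem]
        constructor
        · rintro ⟨h1, h2⟩; exact ⟨by simpa using h2, by simpa using h1⟩
        · rintro ⟨h1, h2⟩; exact ⟨by simpa using h2, by simpa using h1⟩
      have h2 : u.Perm (s.filter (fun m => !payOrder.contains m)) :=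
        (PySem.List.sorted_perm s (fun x => x) false).filter _
      exact (h1.append h2).trans (List.filter_append_perm _ s)
    have hpw : List.Pairwise (fun a b => pvKey a < pvKey b) (known ++ u) := by
      rw [List.pairwise_append]
      refine ⟨List.Pairwise.sublist List.filter_sublist payOrder_pairwise_key, ?_, ?_⟩
      · have h0 : List.Pairwise (fun a b : String => a < b) u :=
          List.Pairwise.sublist List.filter_sublist (PySem.List.sorted_ofList_pairwise_lt methods)
        refine List.Pairwise.imp_of_mem ?_ h0
        intro a b ha hb hab
        rw [pvKey_of_not_mem a (hmemu a ha), pvKey_of_not_mem b (hmemu b hb)]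
        exact Prod.Lex.right _ hab
      · intro a ha b hb
        exact key_lt_of_mem_not_mem a b (hmemknown a ha) (hmemu b hb)
    have hsorted : PySem.List.sorted s pvKey = known ++ u :=
      PySem.List.sorted_eq_of_perm_of_pairwise_lt s (known ++ u) pvKey hperm hpw
    simp only [hsorted]
    -- A's two loops are filter-map passes
    rw [PySem.List.foldl_append_if (fun m => PySem.Set.contains s m)
      (fun m => payShort.getD m (String.ofList (pyTitleGo false (PySem.Str.replace m "_" " ").toList)))
      payOrder []]
    rw [PySem.List.foldl_append_if (fun m => !payOrder.contains m)
      (fun m => payShort.getD m m) (PySem.List.sorted s (fun x => x)) _]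
    rw [List.nil_append, List.map_append]
    have hlab : known.map (fun m =>
        payShort.getD m (String.ofList (pyTitleGo false (PySem.Str.replace m "_" " ").toList))) =
        known.map (fun m => payShort.getD m m) :=
      List.map_congr_left (fun a ha => known_label a (hmemknown a ha))
    rw [hlab]

-- ===== VERDICT (by name: the statement is the Claim_ definition above) =====
theorem format_payment_channel_labels_py_spec : Claim_equal_format_payment_channel_labels_py := by
  intro methods _
  unfold Spec_format_payment_channel_labels_py
  exact main_eq methods
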